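-- pv_equiv track=rewrite | github.com/mfulmek/PSDM | chapters/chapter2/unrank-product-lex/unrank-product-lex.py | unrank_product_lex
-- ===== SOURCE A (Python) =====
-- def unrank_product_lex(the_number, the_maxima):
--     """Bestimme aus der gegebenen Nummer (mit 1 beginnend)
--     das entsprechende Tupel in der lexikographischen
--     Auflistung des cartesischen Produkts
--     [the_maxima[0]] x [the_maxima[1]] x ...
--     """
--     # Wie in der rank-Funktion ist es besser, "mit dem Zählen bei
--     # Null zu beginnen":
--     the_number-= 1
--     # (Äquivalent: "the_number = the_number - 1".)
--
--     # Wir beginnen mit dem leeren Tupel: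
--     the_tuple = []
--     for divisor in the_maxima[::-1]:
--         # Division mit Rest: a % b für zwei ganze Zahlen
--         # a, b liefert a modulo b.
--         integer_remainder = the_number % divisor
--         # Wir bleiben (noch) bei der Gewohnheit, das Zählen
--         # bei Eins zu beginnen:
--         the_tuple = [integer_remainder + 1]+the_tuple
--         # Das könnte man auch in eine Zeile zusammenfassen:
--         # the_tuple = [the_number % divisor + 1]+the_tuple
--
--         # ACHTUNG, würde man hier
--         #    "the_number / divisor"
--         # schreiben, dann erhielte man eine Fließkommazahl
--         # (Datentyp float), also i.a. KEINE ganze Zahl!!!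
--         the_number = the_number // divisor
--
--     return the_tuple
-- ===== SOURCE B (Python) =====
-- def unrank_product_lex(the_number, the_maxima):
--     """Unrank (1-based) into the lex-ordered cartesian product
--     [the_maxima[0]] x [the_maxima[1]] x ...
--     Weights-table method: first build the table of suffix products
--     (weights[i] = product of all maxima after position i), then read
--     each digit directly as (offset // weight) % maximum, left to right."""
--     weights = []
--     acc = 1
--     for m in reversed(the_maxima):
--         weights.append(acc)
--         acc *= m
--     weights.reverse()
--     offset = the_number - 1
--     return [offset // w % m + 1 for w, m in zip(weights, the_maxima)]
-- ===== Notes on version B (the rewrite author's own statement) =====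
-- stated objective: alternative
-- what changed: B replaces A's right-to-left running modulo/quotient loop by the positional-number-system method: a precomputed table of suffix-product weights, then one forward pass reading each digit independently as (offset // weight) % maximum.
-- outside the precondition, e.g. on unrank_product_lex(20, [5, -1, 2]): A returns [2, 1, 2], B returns [1, 1, 2]; on unrank_product_lex(5, [2, 0]): A raises ZeroDivisionError, B raises ZeroDivisionError
import Mathlib
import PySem

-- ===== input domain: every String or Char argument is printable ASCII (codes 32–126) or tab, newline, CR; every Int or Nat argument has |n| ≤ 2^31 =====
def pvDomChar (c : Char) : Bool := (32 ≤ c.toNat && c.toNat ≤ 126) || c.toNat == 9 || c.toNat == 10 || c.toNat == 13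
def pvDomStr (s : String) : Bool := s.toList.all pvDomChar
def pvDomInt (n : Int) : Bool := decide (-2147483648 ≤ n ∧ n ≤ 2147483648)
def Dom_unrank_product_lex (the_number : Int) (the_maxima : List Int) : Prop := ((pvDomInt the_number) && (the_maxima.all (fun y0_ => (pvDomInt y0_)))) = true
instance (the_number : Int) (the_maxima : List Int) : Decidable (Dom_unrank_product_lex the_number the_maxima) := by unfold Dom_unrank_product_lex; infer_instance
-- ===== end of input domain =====

-- B computes each digit independently from a precomputed suffix-product weights table (positional-number-system method) instead of A's right-to-left running modulo/quotient loop with per-step prepends.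


-- ===== PORT A =====
def unrank_product_lex (the_number : Int) (the_maxima : List Int) : List Int :=
  let n := the_number - 1
  -- the_maxima[::-1]
  let rev : List Int := ((PySem.List.slice? the_maxima none none (-1)).getD [])
  -- loop state: (the_number, the_tuple); '[r+1] + the_tuple' is a prepend
  let st := rev.foldl
    (fun (st : Int × List Int) (divisor : Int) =>
      let integer_remainder := PySem.Int.mod st.1 divisor
      (PySem.Int.floordiv st.1 divisor, (integer_remainder + 1) :: st.2))
    (n, [])
  st.2

-- ===== PORT B =====
def unrank_product_lex_alt (the_number : Int) (the_maxima : List Int) : List Int :=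
  -- pass 1: build the weights (suffix products), accumulating over reversed(the_maxima)
  let st := the_maxima.reverse.foldl
    (fun (st : List Int × Int) (m : Int) => (st.1 ++ [st.2], st.2 * m))
    ([], 1)
  let weights := st.1.reverse
  let offset := the_number - 1
  -- pass 2: [offset // w % m + 1 for w, m in zip(weights, the_maxima)]
  (weights.zip the_maxima).map
    (fun wm => PySem.Int.mod (PySem.Int.floordiv offset wm.1) wm.2 + 1)

-- ===== PRECONDITION & SPEC =====
-- Pre_ restricts to positive maxima, the natural domain of product sizes: a 0 in the_maxima makes
-- the Python A (and B) raise ZeroDivisionError, and on negative maxima (a meaningless product) A's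
-- values are artefacts of floor-division sign handling which B's weights method only sometimes
-- happens to reproduce, so nothing is claimed there.
def Pre_unrank_product_lex (the_number : Int) (the_maxima : List Int) : Prop :=
  ∀ m ∈ the_maxima, 0 < m
instance (the_number : Int) (the_maxima : List Int) : Decidable (Pre_unrank_product_lex the_number the_maxima) := by unfold Pre_unrank_product_lex; infer_instance

def pvWitness_unrank_product_lex : Int × List Int := (5, [2, 3])

def Spec_unrank_product_lex (the_number : Int) (the_maxima : List Int) (out : List Int) : Prop := out = unrank_product_lex_alt the_number the_maxima
instance (the_number : Int) (the_maxima : List Int) (out : List Int) : Decidable (Spec_unrank_product_lex the_number the_maxima out) := by unfold Spec_unrank_product_lex; infer_instance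

-- ===== CLAIM =====
def Claim_equal_unrank_product_lex : Prop := ∀ (the_number : Int) (the_maxima : List Int), Dom_unrank_product_lex the_number the_maxima → Pre_unrank_product_lex the_number the_maxima → Spec_unrank_product_lex the_number the_maxima (unrank_product_lex the_number the_maxima)

-- ===== LEMMAS AND PROOFS =====
-- reference digit chain (right-to-left digits, as A produces them)
def pvDChain (q : Int) : List Int → List Int
  | [] => []
  | m :: rest => (PySem.Int.mod q m + 1) :: pvDChain (PySem.Int.floordiv q m) rest

-- reference weight chain (exclusive prefix products of the reversed maxima)
def pvWeights (acc : Int) : List Int → List Int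
  | [] => []
  | m :: rest => acc :: pvWeights (acc * m) rest

theorem pvA_fold (r : List Int) (q : Int) (acc : List Int) :
    r.foldl
      (fun (st : Int × List Int) (divisor : Int) =>
        let integer_remainder := PySem.Int.mod st.1 divisor
        (PySem.Int.floordiv st.1 divisor, (integer_remainder + 1) :: st.2))
      (q, acc)
    = ((r.foldl (fun a m => PySem.Int.floordiv a m) q), (pvDChain q r).reverse ++ acc) := by
  induction r generalizing q acc with
  | nil => simp [pvDChain]
  | cons m rest ih => simp [pvDChain, ih]

theorem pvB_fold1 (r : List Int) (pre : List Int) (acc : Int) :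
    r.foldl (fun (st : List Int × Int) (m : Int) => (st.1 ++ [st.2], st.2 * m)) (pre, acc)
    = (pre ++ pvWeights acc r, acc * r.prod) := by
  induction r generalizing pre acc with
  | nil => simp [pvWeights]
  | cons m rest ih => simp [pvWeights, ih, mul_assoc]

theorem pvWeights_length (acc : Int) (r : List Int) :
    (pvWeights acc r).length = r.length := by
  induction r generalizing acc with
  | nil => rfl
  | cons m rest ih => simp [pvWeights, ih]

theorem pv_floordiv_floordiv (x a b : Int) (ha : 0 < a) (hb : 0 < b) :
    PySem.Int.floordiv (PySem.Int.floordiv x a) b = PySem.Int.floordiv x (a * b) := by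
  rw [PySem.Int.floordiv_eq_ediv_of_pos ha, PySem.Int.floordiv_eq_ediv_of_pos hb,
    PySem.Int.floordiv_eq_ediv_of_pos (mul_pos ha hb)]
  exact Int.ediv_ediv_of_nonneg ha.le

theorem pv_main (r : List Int) (hr : ∀ m ∈ r, 0 < m) (n acc : Int) (hacc : 0 < acc) :
    pvDChain (PySem.Int.floordiv n acc) r
    = ((pvWeights acc r).zip r).map
        (fun wm => PySem.Int.mod (PySem.Int.floordiv n wm.1) wm.2 + 1) := by
  induction r generalizing acc with
  | nil => simp [pvDChain, pvWeights]
  | cons m rest ih =>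
    have hm : 0 < m := hr m (by simp)
    have hrest : ∀ x ∈ rest, 0 < x := fun x hx => hr x (by simp [hx])
    simp only [pvDChain, pvWeights, List.zip_cons_cons, List.map_cons]
    refine congrArg₂ _ rfl ?_
    rw [pv_floordiv_floordiv n acc m hacc hm]
    exact ih hrest (acc * m) (mul_pos hacc hm)

theorem pv_zip_reverse {α β : Type} (xs : List α) (ys : List β) (h : xs.length = ys.length) :
    xs.reverse.zip ys.reverse = (xs.zip ys).reverse := by
  apply List.ext_getElem
  · simp [h]
  · intro i h1 h2
    simp only [List.getElem_zip, List.getElem_reverse, List.getElem_zip] at *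
    simp only [List.length_zip] at *
    congr 1 <;> congr 1 <;> omega

theorem pv_floordiv_one (x : Int) : PySem.Int.floordiv x 1 = x := by
  rw [PySem.Int.floordiv_eq_ediv_of_pos (by norm_num)]; exact Int.ediv_one x

-- ===== VERDICT =====
theorem unrank_product_lex_spec : Claim_equal_unrank_product_lex := by
  intro the_number the_maxima _ hpre
  unfold Spec_unrank_product_lex unrank_product_lex unrank_product_lex_alt
  simp only [PySem.List.slice?_none_none_neg_one, Option.getD_some]
  rw [pvA_fold, pvB_fold1]
  have hrev : ∀ m ∈ the_maxima.reverse, 0 < m := by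
    intro m hm; exact hpre m (List.mem_reverse.mp hm)
  have hmain := pv_main the_maxima.reverse hrev (the_number - 1) 1 (by norm_num)
  rw [pv_floordiv_one] at hmain
  have hzip : (pvWeights 1 the_maxima.reverse).reverse.zip the_maxima
      = ((pvWeights 1 the_maxima.reverse).zip the_maxima.reverse).reverse := by
    have := pv_zip_reverse (pvWeights 1 the_maxima.reverse) the_maxima.reverse
      (by rw [pvWeights_length, List.length_reverse])
    simpa using this
  simp only [List.nil_append, hzip, List.map_reverse, ← hmain, List.append_nil]
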